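-- pv_equiv track=rewrite | github.com/boostcampaitech2/image-classification-level1-11 | util.py | ages_subdiv_to_origin
-- ===== SOURCE A (Python) =====
-- def ages_subdiv_to_origin(sdage):
--     result = []
--     for age in sdage:
--         if age < 2:
--             result.append(0)
--         elif age < 5:
--             result.append(1)
--         else:
--             result.append(2)
--     return result
-- ===== SOURCE B (Python) =====
-- def ages_subdiv_to_origin(sdage):
--     # threshold-major: start all-zero, one pass per threshold incrementing
--     # every position whose age reaches it; bucket = number of thresholds passed
--     result = [0] * len(sdage)
--     for t in (2, 5):
--         for i, age in enumerate(sdage):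
--             if age >= t:
--                 result[i] += 1
--     return result
-- ===== Notes on version B (the rewrite author's own statement) =====
-- stated objective: alternative
-- what changed: Inverted the traversal: instead of classifying each element once with a comparison chain, B makes one staged pass per threshold (2 then 5) over an all-zero counter array, incrementing positions whose age reaches the threshold, so the bucket emerges as the count of thresholds passed.
import Mathlib
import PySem

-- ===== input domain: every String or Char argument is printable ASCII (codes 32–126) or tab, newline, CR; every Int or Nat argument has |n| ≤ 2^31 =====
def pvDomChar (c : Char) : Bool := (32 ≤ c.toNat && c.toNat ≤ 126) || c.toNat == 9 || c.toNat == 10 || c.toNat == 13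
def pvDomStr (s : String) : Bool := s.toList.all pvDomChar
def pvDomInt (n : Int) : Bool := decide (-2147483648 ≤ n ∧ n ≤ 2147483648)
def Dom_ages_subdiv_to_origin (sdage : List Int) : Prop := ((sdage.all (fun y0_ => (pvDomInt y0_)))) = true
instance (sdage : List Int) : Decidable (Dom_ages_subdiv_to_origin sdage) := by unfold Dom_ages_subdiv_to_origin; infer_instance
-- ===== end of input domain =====

-- B inverts A's traversal: one staged pass per threshold over an all-zero counter list,
-- incrementing positions whose age reaches the threshold (objective: alternative).

-- ===== PORT A =====
-- transliteration of A's element loop: append 0/1/2 by the comparison chain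
def ages_subdiv_to_origin (sdage : List Int) : List Int :=
  sdage.foldl
    (fun result age =>
      if age < 2 then result ++ [0]
      else if age < 5 then result ++ [1]
      else result ++ [2])
    []

-- ===== PORT B =====
-- inner pass of Source B: 'for i, age in enumerate(sdage): if age >= t: result[i] += 1',
-- rendered as the positionwise update of result alongside sdage
def pvPassT (t : Int) (result sdage : List Int) : List Int :=
  (result.zip sdage).map (fun p => if p.2 ≥ t then p.1 + 1 else p.1)

def ages_subdiv_to_origin_alt (sdage : List Int) : List Int :=
  [2, 5].foldl (fun result t => pvPassT t result sdage)
    (List.replicate sdage.length 0)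

-- ===== PRECONDITION & SPEC =====
def Spec_ages_subdiv_to_origin (sdage : List Int) (out : List Int) : Prop := out = ages_subdiv_to_origin_alt sdage
instance (sdage : List Int) (out : List Int) : Decidable (Spec_ages_subdiv_to_origin sdage out) := by unfold Spec_ages_subdiv_to_origin; infer_instance

-- ===== CLAIM (what is proved, stated in full; the proofs are below) =====
def Claim_equal_ages_subdiv_to_origin : Prop := ∀ (sdage : List Int), Dom_ages_subdiv_to_origin sdage → Spec_ages_subdiv_to_origin sdage (ages_subdiv_to_origin sdage)

-- ===== LEMMAS AND PROOFS =====

-- B's two staged passes compute A's branch chain pointwise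
theorem alt_eq_map (l : List Int) :
    ages_subdiv_to_origin_alt l
      = l.map (fun age => if age < 2 then 0 else if age < 5 then (1:Int) else 2) := by
  induction l with
  | nil => rfl
  | cons a t ih =>
      simp only [ages_subdiv_to_origin_alt, pvPassT, List.foldl, List.length_cons,
        List.replicate_succ, List.zip_cons_cons, List.map_cons, List.map] at ih ⊢
      exact List.cons_eq_cons.mpr ⟨by split_ifs <;> omega, ih⟩

theorem foldl_acc (l acc : List Int) :
    l.foldl
      (fun result age =>
        if age < 2 then result ++ [0]
        else if age < 5 then result ++ [1]
        else result ++ [2])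
      acc
    = acc ++ l.map (fun age => if age < 2 then 0 else if age < 5 then (1:Int) else 2) := by
  induction l generalizing acc with
  | nil => simp
  | cons a t ih =>
      simp only [List.foldl, List.map]
      rw [ih]
      split_ifs <;> simp

-- ===== VERDICT (by name: the statement is the Claim_ definition above) =====
theorem ages_subdiv_to_origin_spec : Claim_equal_ages_subdiv_to_origin := by
  intro sdage _
  show _ = _
  rw [alt_eq_map]
  simpa [ages_subdiv_to_origin] using foldl_acc sdage []
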